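-- pv_equiv track=rewrite | github.com/Raptor56MTG/Jane-Street-Puzzles-2024 | 2024-mar/adjacent.py | adjacent_two_edge
-- ===== SOURCE A (Python) =====
-- def adjacent_two_edge(value: int) -> list[tuple[int]]:
--     """This function takes a number and outputs a list of possible
--     values of three different numbers 1 - 9 that can sum up to it. The sum
--     must be of the form 2x + y = value"""
--
--     valid_sums = []
--
--     doubles = [2, 3, 4, 5, 6, 7, 8, 9]
--     singles = [1, 2, 3, 4, 5, 6, 7, 8, 9]
--
--     for i in doubles:
--         # remove our double value from the singles list
--         updated_singles = singles.copy()
--         updated_singles.remove(i)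
--         for j in updated_singles:
--             if 2 * i + j == value:
--                 valid_sums.append([i, i, j])
--
--     return valid_sums
-- ===== SOURCE B (Python) =====
-- def adjacent_two_edge(value: int) -> list:
--     """Closed form: for each double i, the unique candidate is j = value - 2*i;
--     keep it if it is a digit 1-9 different from i."""
--     valid_sums = []
--     for i in range(2, 10):
--         j = value - 2 * i
--         if 1 <= j <= 9 and j != i:
--             valid_sums.append([i, i, j])
--     return valid_sums
-- ===== Notes on version B (the rewrite author's own statement) =====
-- stated objective: simpler
-- what changed: Replaces the inner scan over a copied-and-pruned singles list with the closed-form candidate j = value - 2*i plus a bounds/inequality check, keeping the outer order.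
import Mathlib
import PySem

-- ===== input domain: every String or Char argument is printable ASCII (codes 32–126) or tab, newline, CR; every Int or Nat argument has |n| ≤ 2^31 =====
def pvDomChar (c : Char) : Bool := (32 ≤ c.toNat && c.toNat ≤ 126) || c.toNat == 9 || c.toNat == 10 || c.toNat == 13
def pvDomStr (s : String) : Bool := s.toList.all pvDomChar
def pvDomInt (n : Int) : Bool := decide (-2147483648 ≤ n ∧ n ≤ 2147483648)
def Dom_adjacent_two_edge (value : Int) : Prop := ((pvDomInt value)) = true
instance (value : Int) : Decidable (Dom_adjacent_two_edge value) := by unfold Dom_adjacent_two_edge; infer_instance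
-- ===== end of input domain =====

-- B replaces A's inner scan over a pruned singles list with the closed-form candidate
-- j = value - 2*i plus a bounds check (objective: simpler).


-- ===== PORT A =====
-- `singles.copy(); updated_singles.remove(i)` → PySem.List.remove?; i is always a member
-- of singles, so remove? is always `some` and the `.getD []` default is never taken.
def adjacent_two_edge (value : Int) : List (List Int) :=
  let doubles : List Int := [2, 3, 4, 5, 6, 7, 8, 9]
  let singles : List Int := [1, 2, 3, 4, 5, 6, 7, 8, 9]
  doubles.foldl (fun valid_sums i =>
    let updated_singles := (PySem.List.remove? singles i).getD []
    updated_singles.foldl (fun acc j =>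
      if 2 * i + j = value then acc ++ [[i, i, j]] else acc) valid_sums) []

-- ===== PORT B =====
def adjacent_two_edge_alt (value : Int) : List (List Int) :=
  (PySem.List.pyRange 2 10 1).foldl (fun valid_sums i =>
    let j := value - 2 * i
    if 1 ≤ j ∧ j ≤ 9 ∧ j ≠ i then valid_sums ++ [[i, i, j]] else valid_sums) []

-- ===== PRECONDITION & SPEC =====
def Spec_adjacent_two_edge (value : Int) (out : List (List Int)) : Prop := out = adjacent_two_edge_alt value
instance (value : Int) (out : List (List Int)) : Decidable (Spec_adjacent_two_edge value out) := by unfold Spec_adjacent_two_edge; infer_instance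

-- ===== CLAIM (what is proved, stated in full; the proofs are below) =====
def Claim_equal_adjacent_two_edge : Prop := ∀ (value : Int), Dom_adjacent_two_edge value → Spec_adjacent_two_edge value (adjacent_two_edge value)

-- ===== LEMMAS AND PROOFS =====

-- a conditional-append foldl is an append of a flatMap of conditional singletons
theorem foldl_ite_append {α β : Type} (P : α → Prop) [DecidablePred P] (f : α → β)
    (l : List α) (acc : List β) :
    l.foldl (fun acc x => if P x then acc ++ [f x] else acc) acc
      = acc ++ l.flatMap (fun x => if P x then [f x] else []) := by
  induction l generalizing acc with
  | nil => simp
  | cons x xs ih =>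
    simp only [List.foldl_cons, List.flatMap_cons]
    rw [ih]
    split_ifs <;> simp

-- a flatMap of conditional singletons over a duplicate-free list picks out the unique match
theorem flatMap_eq_single {α β : Type} [DecidableEq α] (f : α → List β) (a : α)
    (js : List α) (hnd : js.Nodup) :
    js.flatMap (fun j => if j = a then f j else []) = if a ∈ js then f a else [] := by
  induction js with
  | nil => simp
  | cons x xs ih =>
    simp only [List.flatMap_cons, List.nodup_cons] at *
    obtain ⟨hx, hxs⟩ := hnd
    by_cases hxa : x = a
    · subst hxa
      have hz : xs.flatMap (fun j => if j = x then f j else []) = [] := by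
        rw [List.flatMap_eq_nil_iff]
        intro j hj
        rw [if_neg]
        intro h; exact hx (h ▸ hj)
      simp [hz]
    · simp [hxa, ih hxs, Ne.symm hxa]

-- per-double characterization of A's inner scan
theorem inner_char (value i : Int) (js : List Int) (hnd : js.Nodup)
    (hmem : ∀ j : Int, j ∈ js ↔ (1 ≤ j ∧ j ≤ 9 ∧ j ≠ i)) :
    js.flatMap (fun j => if 2 * i + j = value then [[i, i, j]] else [])
      = if 1 ≤ value - 2*i ∧ value - 2*i ≤ 9 ∧ value - 2*i ≠ i
          then [[i, i, value - 2*i]] else [] := by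
  have hcond : ∀ j : Int, (if 2 * i + j = value then ([[i, i, j]] : List (List Int)) else [])
      = if j = value - 2*i then [[i, i, j]] else [] := by
    intro j
    by_cases h : 2 * i + j = value
    · rw [if_pos h, if_pos (by omega)]
    · rw [if_neg h, if_neg (by omega)]
  rw [List.flatMap_congr (fun j _ => hcond j),
      flatMap_eq_single (fun j => [[i, i, j]]) (value - 2*i) js hnd]
  have hm := hmem (value - 2*i)
  by_cases h : 1 ≤ value - 2*i ∧ value - 2*i ≤ 9 ∧ value - 2*i ≠ i
  · rw [if_pos (hm.mpr h), if_pos h]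
  · rw [if_neg (fun hc => h (hm.mp hc)), if_neg h]

-- ===== VERDICT (by name: the statement is the Claim_ definition above) =====
theorem adjacent_two_edge_spec : Claim_equal_adjacent_two_edge := by
  intro value _
  unfold Spec_adjacent_two_edge adjacent_two_edge adjacent_two_edge_alt
  simp only
  rw [show (PySem.List.pyRange 2 10 1) = ([2,3,4,5,6,7,8,9] : List Int) from by decide]
  rw [foldl_ite_append (fun i : Int => 1 ≤ value - 2*i ∧ value - 2*i ≤ 9 ∧ value - 2*i ≠ i)
        (fun i : Int => [i, i, value - 2*i])]
  have hA : ∀ (l : List Int) (acc : List (List Int)),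
      l.foldl (fun valid_sums i =>
        ((PySem.List.remove? ([1,2,3,4,5,6,7,8,9] : List Int) i).getD []).foldl
          (fun acc j => if 2 * i + j = value then acc ++ [[i, i, j]] else acc) valid_sums) acc
      = acc ++ l.flatMap (fun i =>
          ((PySem.List.remove? ([1,2,3,4,5,6,7,8,9] : List Int) i).getD []).flatMap
            (fun j => if 2 * i + j = value then [[i, i, j]] else [])) := by
    intro l
    induction l with
    | nil => simp
    | cons x xs ih =>
      intro acc
      simp only [List.foldl_cons, List.flatMap_cons]
      rw [foldl_ite_append (fun j : Int => 2 * x + j = value) (fun j : Int => [x, x, j]), ih]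
      simp
  rw [hA]
  simp only [List.nil_append]
  apply List.flatMap_congr
  intro i hi
  fin_cases hi <;>
    [ rw [show (PySem.List.remove? ([1,2,3,4,5,6,7,8,9] : List Int) 2).getD [] = [1,3,4,5,6,7,8,9] from by decide];
      rw [show (PySem.List.remove? ([1,2,3,4,5,6,7,8,9] : List Int) 3).getD [] = [1,2,4,5,6,7,8,9] from by decide];
      rw [show (PySem.List.remove? ([1,2,3,4,5,6,7,8,9] : List Int) 4).getD [] = [1,2,3,5,6,7,8,9] from by decide];
      rw [show (PySem.List.remove? ([1,2,3,4,5,6,7,8,9] : List Int) 5).getD [] = [1,2,3,4,6,7,8,9] from by decide];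
      rw [show (PySem.List.remove? ([1,2,3,4,5,6,7,8,9] : List Int) 6).getD [] = [1,2,3,4,5,7,8,9] from by decide];
      rw [show (PySem.List.remove? ([1,2,3,4,5,6,7,8,9] : List Int) 7).getD [] = [1,2,3,4,5,6,8,9] from by decide];
      rw [show (PySem.List.remove? ([1,2,3,4,5,6,7,8,9] : List Int) 8).getD [] = [1,2,3,4,5,6,7,9] from by decide];
      rw [show (PySem.List.remove? ([1,2,3,4,5,6,7,8,9] : List Int) 9).getD [] = [1,2,3,4,5,6,7,8] from by decide] ] <;>
    ( apply inner_char <;>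
      first
        | decide
        | (intro j; simp only [List.mem_cons, List.not_mem_nil, or_false]; omega) )
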